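-- pv_equiv track=rewrite | github.com/GRitger/school | 29.01.2025/25.py | f
-- ===== SOURCE A (Python) =====
-- def f(x):
--     a = []
--     d = 23
--     while d * d < x:
--         if x % d == 0 and ((str(d)[0] == "2" and str(d)[-2] == "3") or (str(x // d)[0] == "2" and str(x //d)[-2] == "3") ):
--             a.append(d)
--             a.append(x // d)
--         d += 1
--     if d * d == x:
--         a.append(d)
--     a.sort()
--     return a
-- ===== SOURCE B (Python) =====
-- def f(x):
--     # Enumerate the divisors of x from its prime factorisation instead of
--     # scanning every candidate in [23, sqrt(x)); then filter and sort.
--     def ok(m):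
--         s = str(m)
--         return s[0] == "2" and s[-2] == "3"
--
--     divs, n, p = [1], x, 2
--     while p * p <= n:
--         if n % p == 0:
--             e = 0
--             while n > 1 and n % p == 0:
--                 n //= p
--                 e += 1
--             divs = [d * p ** k for d in divs for k in range(e + 1)]
--         p += 1
--     if n > 1:
--         divs = [d * n ** k for d in divs for k in range(2)]
--
--     out = []
--     for d in divs:
--         if 23 <= d:
--             if d * d < x:
--                 q = x // d
--                 if ok(d) or ok(q):
--                     out.append(d)
--                     out.append(q)
--             elif d * d == x:
--                 out.append(d)
--     out.sort()
--     return out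
-- ===== Notes on version B (the rewrite author's own statement) =====
-- stated objective: alternative
-- what changed: B replaces A's linear scan of every candidate divisor up to sqrt(x) by trial-division prime factorisation of x followed by combinatorial enumeration of all of its divisors, which are then filtered by the same digit condition and sorted.
import Mathlib
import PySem

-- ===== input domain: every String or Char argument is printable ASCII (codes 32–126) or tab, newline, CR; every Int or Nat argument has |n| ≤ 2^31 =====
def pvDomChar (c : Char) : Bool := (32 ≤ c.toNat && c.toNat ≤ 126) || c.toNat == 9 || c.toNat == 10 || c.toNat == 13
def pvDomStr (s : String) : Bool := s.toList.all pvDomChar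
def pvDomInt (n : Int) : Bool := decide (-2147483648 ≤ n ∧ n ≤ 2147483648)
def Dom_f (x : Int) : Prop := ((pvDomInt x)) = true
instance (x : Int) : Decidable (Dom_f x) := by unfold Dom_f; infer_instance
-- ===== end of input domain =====

-- B enumerates the divisors of x from its prime factorisation instead of scanning every
-- candidate divisor up to sqrt(x), then filters and sorts (objective: different algorithm).

-- termination helper for A's loop: d*d < x forces d < x
theorem pvStepLt (x d : Int) (h : d * d < x) : (x - (d + 1)).toNat < (x - d).toNat := by
  have hdx : d < x := by nlinarith [sq_nonneg d, sq_nonneg (d - 1)]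
  omega

-- ===== PORT A =====
-- the digit test as A writes it inline
def condA (x d : Int) : Bool :=
  PySem.Int.mod x d == 0 &&
  (((PySem.Str.pyGet? (PySem.Int.toStr d) 0 == some '2') &&
      (PySem.Str.pyGet? (PySem.Int.toStr d) (-2) == some '3')) ||
   ((PySem.Str.pyGet? (PySem.Int.toStr (PySem.Int.floordiv x d)) 0 == some '2') &&
      (PySem.Str.pyGet? (PySem.Int.toStr (PySem.Int.floordiv x d)) (-2) == some '3')))

def loopA (x d : Int) (a : List Int) : List Int :=
  if h : d * d < x then
    loopA x (d + 1) (if condA x d then a ++ [d, PySem.Int.floordiv x d] else a)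
  else if d * d = x then a ++ [d] else a
termination_by (x - d).toNat
decreasing_by exact pvStepLt x d h

def f (x : Int) : List Int :=
  PySem.List.sorted (loopA x 23 []) (fun y => y) false

-- ===== PORT B =====
-- B's helper ok(m): s = str(m); s[0]=="2" and s[-2]=="3"
def okB (m : Int) : Bool :=
  let s := PySem.Int.toStr m
  (PySem.Str.pyGet? s 0 == some '2') && (PySem.Str.pyGet? s (-2) == some '3')

-- division-shrink fact used for the loops' termination
theorem pvFloordivLt (n p : Int) (hn : 1 ≤ n) (hp : 2 ≤ p) :
    0 ≤ PySem.Int.floordiv n p ∧ PySem.Int.floordiv n p < n := by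
  rw [PySem.Int.floordiv_eq_ediv_of_pos (by omega)]
  have hq := Int.mul_ediv_add_emod n p
  have hr1 := Int.emod_nonneg n (show p ≠ 0 by omega)
  have hr2 := Int.emod_lt_of_pos n (show (0:Int) < p by omega)
  have h0 : 0 ≤ n / p := Int.ediv_nonneg (by omega) (by omega)
  have h1 : 2 * (n / p) ≤ p * (n / p) := by nlinarith
  omega

theorem pvExtractDec (n : Int) (k : Nat) (h1 : 1 < n) :
    (PySem.Int.floordiv n ((k : Int) + 2)).toNat < n.toNat := by
  have := pvFloordivLt n ((k : Int) + 2) (by omega) (by omega)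
  omega

-- inner while of Source B: 'while n > 1 and n % p == 0: n //= p; e += 1'; returns (e, n).
-- p is carried as k+2 (it only ever takes values ≥ 2, starting at 2).
def extract (n : Int) (k : Nat) : Int × Int :=
  if h : 1 < n ∧ PySem.Int.mod n ((k : Int) + 2) = 0 then
    let r := extract (PySem.Int.floordiv n ((k : Int) + 2)) k
    (r.1 + 1, r.2)
  else (0, n)
termination_by n.toNat
decreasing_by exact pvExtractDec n k h.1

-- facts the outer loop's termination needs about extract
theorem extract_le : ∀ (N : ℕ) (n : Int) (k : Nat), n.toNat = N → 0 ≤ n →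
    0 ≤ (extract n k).2 ∧ (extract n k).2 ≤ n := by
  intro N
  induction N using Nat.strong_induction_on with
  | _ N ih =>
    intro n k hN hn
    rw [extract]
    split
    · rename_i h
      dsimp only
      have hq := pvFloordivLt n ((k : Int) + 2) (by omega) (by omega)
      have := ih (PySem.Int.floordiv n ((k : Int) + 2)).toNat (by omega) _ k rfl (by omega)
      exact ⟨this.1, by omega⟩
    · exact ⟨hn, le_refl n⟩

theorem extract_lt (n : Int) (k : Nat) (h1 : 1 < n)
    (h2 : PySem.Int.mod n ((k : Int) + 2) = 0) :
    0 ≤ (extract n k).2 ∧ (extract n k).2 < n := by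
  rw [extract, dif_pos ⟨h1, h2⟩]
  dsimp only
  have hq := pvFloordivLt n ((k : Int) + 2) (by omega) (by omega)
  have := extract_le (PySem.Int.floordiv n ((k : Int) + 2)).toNat _ k rfl (by omega)
  exact ⟨this.1, by omega⟩

theorem pvLoopFacDec1 (n : Int) (k : Nat) (h : ((k : Int) + 2) * ((k : Int) + 2) ≤ n)
    (hm : PySem.Int.mod n ((k : Int) + 2) = 0) :
    ((extract n k).2 - (((k + 1 : ℕ) : Int) + 2)).toNat < (n - ((k : Int) + 2)).toNat := by
  have h4 : (k : Int) + 4 ≤ n := by nlinarith [Int.natCast_nonneg k]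
  have := extract_lt n k (by omega) hm
  push_cast
  omega

theorem pvLoopFacDec2 (n : Int) (k : Nat) (h : ((k : Int) + 2) * ((k : Int) + 2) ≤ n) :
    (n - (((k + 1 : ℕ) : Int) + 2)).toNat < (n - ((k : Int) + 2)).toNat := by
  have h4 : (k : Int) + 4 ≤ n := by nlinarith [Int.natCast_nonneg k]
  push_cast
  omega

-- outer while of Source B: 'while p*p <= n: if n%p==0: (extract; divs = [d*p**k for d in divs
-- for k in range(e+1)]); p += 1'; p carried as k+2.
def loopFac (n : Int) (k : Nat) (divs : List Int) : Int × List Int :=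
  if h : ((k : Int) + 2) * ((k : Int) + 2) ≤ n then
    if hm : PySem.Int.mod n ((k : Int) + 2) = 0 then
      let r := extract n k
      loopFac r.2 (k + 1)
        (divs.flatMap (fun d => (PySem.List.pyRange 0 (r.1 + 1) 1).map (fun j => d * ((k : Int) + 2) ^ j.toNat)))
    else loopFac n (k + 1) divs
  else (n, divs)
termination_by (n - ((k : Int) + 2)).toNat
decreasing_by
  · exact pvLoopFacDec1 n k h hm
  · exact pvLoopFacDec2 n k h

def f_alt (x : Int) : List Int :=
  let r := loopFac x 0 [1]
  let divs :=
    if 1 < r.1 then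
      r.2.flatMap (fun d => (PySem.List.pyRange 0 2 1).map (fun j => d * r.1 ^ j.toNat))
    else r.2
  PySem.List.sorted (divs.foldl (fun acc d =>
    if 23 ≤ d then
      if d * d < x then
        if okB d || okB (PySem.Int.floordiv x d) then acc ++ [d, PySem.Int.floordiv x d] else acc
      else if d * d = x then acc ++ [d] else acc
    else acc) ([] : List Int)) (fun y => y) false

-- ===== PRECONDITION & SPEC =====
def Spec_f (x : Int) (out : List Int) : Prop := out = f_alt x
instance (x : Int) (out : List Int) : Decidable (Spec_f x out) := by unfold Spec_f; infer_instance

-- ===== CLAIM (what is proved, stated in full; the proofs are below) =====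
def Claim_equal_f : Prop := ∀ (x : Int), Dom_f x → Spec_f x (f x)

-- ===== LEMMAS AND PROOFS =====

-- ---------- shared contribution function ----------
-- what a qualifying candidate d contributes to the (unsorted) result
def contrib (x d : Int) : List Int :=
  if 23 ≤ d ∧ d * d < x ∧ PySem.Int.mod x d = 0 ∧ (okB d || okB (PySem.Int.floordiv x d)) = true then
    [d, PySem.Int.floordiv x d]
  else if 23 ≤ d ∧ d * d = x then [d] else []

theorem condA_eq (x d : Int) :
    condA x d = ((PySem.Int.mod x d == 0) && (okB d || okB (PySem.Int.floordiv x d))) := rfl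

-- ---------- A-side: the loop is the flatMap of contrib over [d, x) ----------
theorem loopA_acc (x : Int) : ∀ n d a, (x - d).toNat = n →
    loopA x d a = a ++ loopA x d [] := by
  intro n
  induction n using Nat.strong_induction_on with
  | _ n ih =>
    intro d a hn
    by_cases h : d * d < x
    · conv_lhs => rw [loopA]
      conv_rhs => rw [loopA]
      rw [dif_pos h, dif_pos h]
      rw [ih _ (hn ▸ pvStepLt x d h) (d+1) _ rfl]
      conv_rhs => simp only [List.nil_append]; rw [ih _ (hn ▸ pvStepLt x d h) (d+1) (if condA x d then [d, PySem.Int.floordiv x d] else []) rfl]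
      by_cases hc : condA x d <;> simp [hc]
    · conv_lhs => rw [loopA]
      conv_rhs => rw [loopA]
      rw [dif_neg h, dif_neg h]
      by_cases he : d * d = x <;> simp [he]

theorem loopA_nil_step (x d : Int) (h : d * d < x) :
    loopA x d [] = (if condA x d then [d, PySem.Int.floordiv x d] else []) ++ loopA x (d+1) [] := by
  conv_lhs => rw [loopA]
  rw [dif_pos h, loopA_acc x (x - (d+1)).toNat (d+1) _ rfl]
  by_cases hc : condA x d <;> simp [hc]

theorem loopA_nil_base (x d : Int) (h : ¬ d * d < x) :
    loopA x d [] = if d * d = x then [d] else [] := by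
  conv_lhs => rw [loopA]
  rw [dif_neg h]
  by_cases he : d * d = x <;> simp [he]

theorem contrib_tail_nil (x : Int) : ∀ (n : ℕ) (d : Int), (x - d).toNat = n → 1 ≤ d → x < d * d →
    (PySem.List.pyRange d x 1).flatMap (contrib x) = [] := by
  intro n
  induction n using Nat.strong_induction_on with
  | _ n ih =>
    intro d hn hd hx
    by_cases hdx : x ≤ d
    · rw [PySem.List.pyRange_one_eq_nil hdx]; rfl
    · rw [PySem.List.pyRange_one_cons (by omega), List.flatMap_cons]
      have hc : contrib x d = [] := by
        unfold contrib
        rw [if_neg (by rintro ⟨-, h, -⟩; omega), if_neg (by rintro ⟨-, h⟩; omega)]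
      rw [hc, List.nil_append]
      exact ih _ (by omega) (d+1) rfl (by omega) (by nlinarith)

theorem A_char (x : Int) : ∀ (n : ℕ) (d : Int), (x - d).toNat = n → 23 ≤ d →
    loopA x d [] = (PySem.List.pyRange d x 1).flatMap (contrib x) := by
  intro n
  induction n using Nat.strong_induction_on with
  | _ n ih =>
    intro d hn hd
    by_cases h : d * d < x
    · have hdx : d < x := by nlinarith
      rw [loopA_nil_step x d h, PySem.List.pyRange_one_cons hdx, List.flatMap_cons,
        ih _ (hn ▸ pvStepLt x d h) (d+1) rfl (by omega)]
      congr 1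
      rw [condA_eq]
      unfold contrib
      by_cases h1 : PySem.Int.mod x d = 0 <;>
        by_cases h2 : (okB d || okB (PySem.Int.floordiv x d)) = true <;>
          simp [h1, h2, h, hd, show ¬ d * d = x by omega]
    · rw [loopA_nil_base x d h]
      by_cases he : d * d = x
      · have hdx : d < x := by nlinarith
        rw [PySem.List.pyRange_one_cons hdx, List.flatMap_cons]
        have hc : contrib x d = [d] := by
          unfold contrib
          rw [if_neg (by rintro ⟨-, h', -⟩; omega), if_pos ⟨hd, he⟩]
        rw [hc, if_pos he,
          contrib_tail_nil x (x - (d+1)).toNat (d+1) rfl (by omega) (by nlinarith)]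
        simp
      · rw [if_neg he, contrib_tail_nil x (x - d).toNat d rfl (by omega) (by omega)]

-- ---------- B-side: divisor enumeration correctness ----------
-- l holds exactly the positive divisors of m, each once
def Divs (m : Int) (l : List Int) : Prop := l.Nodup ∧ ∀ d, d ∈ l ↔ 1 ≤ d ∧ d ∣ m

theorem divs_one : Divs 1 [1] := by
  refine ⟨by simp, fun d => ?_⟩
  simp only [List.mem_singleton]
  constructor
  · rintro rfl; exact ⟨le_refl 1, dvd_refl 1⟩
  · rintro ⟨h1, hd⟩
    exact le_antisymm (Int.le_of_dvd one_pos hd) h1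

theorem pow_divisor_decomp (m p : Int) (hp : Prime p) (h2 : 2 ≤ p) (hnd : ¬ p ∣ m) :
    ∀ (E : ℕ) (y : Int), 1 ≤ y → y ∣ m * p ^ E →
      ∃ (d : Int) (j : ℕ), 1 ≤ d ∧ d ∣ m ∧ j ≤ E ∧ y = d * p ^ j := by
  intro E
  induction E with
  | zero =>
    intro y hy hdvd
    exact ⟨y, 0, hy, by simpa using hdvd, le_refl 0, by ring⟩
  | succ E ih =>
    intro y hy hdvd
    by_cases hpy : p ∣ y
    · obtain ⟨y₂, rfl⟩ := hpy
      have hy₂ : 1 ≤ y₂ := by nlinarith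
      have hstep : y₂ ∣ m * p ^ E := by
        have h' : p * y₂ ∣ p * (m * p ^ E) := by
          have : p * (m * p ^ E) = m * p ^ (E + 1) := by ring
          rw [this]; exact hdvd
        exact (mul_dvd_mul_iff_left (show p ≠ 0 by omega)).mp h'
      obtain ⟨d, j, ha, hb, hc, hd'⟩ := ih y₂ hy₂ hstep
      exact ⟨d, j + 1, ha, hb, by omega, by rw [hd']; ring⟩
    · have hc : IsCoprime y (p ^ (E + 1)) :=
        ((hp.coprime_iff_not_dvd.mpr hpy).symm).pow_right
      exact ⟨y, 0, hy, hc.dvd_of_dvd_mul_right hdvd, by omega, by ring⟩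

theorem rep_unique_aux (m p : Int) (h2 : 2 ≤ p) (hnd : ¬ p ∣ m)
    (d₁ d₂ : Int) (j₁ j₂ : ℕ) (hle : j₁ ≤ j₂) (hd₁ : d₁ ∣ m)
    (heq : d₁ * p ^ j₁ = d₂ * p ^ j₂) : d₁ = d₂ ∧ j₁ = j₂ := by
  have hpj : p ^ j₁ ≠ 0 := pow_ne_zero _ (by omega)
  have hkey : d₁ = d₂ * p ^ (j₂ - j₁) := by
    have h' : d₁ * p ^ j₁ = (d₂ * p ^ (j₂ - j₁)) * p ^ j₁ := by
      rw [heq, mul_assoc, ← pow_add]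
      congr 2
      omega
    exact mul_right_cancel₀ hpj h'
  rcases Nat.eq_or_lt_of_le hle with heq' | hlt
  · subst heq'
    simp only [Nat.sub_self, pow_zero, mul_one] at hkey
    exact ⟨hkey, rfl⟩
  · exfalso
    apply hnd
    have hpd : p ∣ d₁ := by
      rw [hkey]
      exact Dvd.dvd.mul_left (dvd_pow_self p (by omega)) d₂
    exact hpd.trans hd₁

theorem rep_unique (m p : Int) (h2 : 2 ≤ p) (hnd : ¬ p ∣ m)
    (d₁ d₂ : Int) (j₁ j₂ : ℕ) (hd₁ : d₁ ∣ m) (hd₂ : d₂ ∣ m)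
    (heq : d₁ * p ^ j₁ = d₂ * p ^ j₂) : d₁ = d₂ ∧ j₁ = j₂ := by
  rcases le_total j₁ j₂ with h | h
  · exact rep_unique_aux m p h2 hnd d₁ d₂ j₁ j₂ h hd₁ heq
  · have := rep_unique_aux m p h2 hnd d₂ d₁ j₂ j₁ h hd₂ heq.symm
    exact ⟨this.1.symm, this.2.symm⟩

theorem pow_inj_int (p : Int) (h2 : 2 ≤ p) {a b : ℕ} (h : p ^ a = p ^ b) : a = b := by
  rcases Nat.lt_trichotomy a b with hlt | heq | hlt
  · exfalso
    have := pow_lt_pow_right₀ (show (1:Int) < p by omega) hlt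
    omega
  · exact heq
  · exfalso
    have := pow_lt_pow_right₀ (show (1:Int) < p by omega) hlt
    omega

theorem divs_expand (m p e : Int) (l : List Int) (hp : Prime p) (h2 : 2 ≤ p) (hm : 1 ≤ m)
    (hnd : ¬ p ∣ m) (he : 0 ≤ e) (hl : Divs m l) :
    Divs (m * p ^ e.toNat)
      (l.flatMap (fun d => (PySem.List.pyRange 0 (e + 1) 1).map (fun j => d * p ^ j.toNat))) := by
  obtain ⟨hnd', hmem⟩ := hl
  constructor
  · rw [List.nodup_flatMap]
    constructor
    · intro d hdl
      have hd1 : 1 ≤ d := ((hmem d).mp hdl).1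
      refine List.Nodup.map_on ?_ (PySem.List.nodup_pyRange_one 0 (e + 1))
      intro j₁ hj₁ j₂ hj₂ hje
      rw [PySem.List.mem_pyRange_one] at hj₁ hj₂
      have : j₁.toNat = j₂.toNat :=
        pow_inj_int p h2 (mul_left_cancel₀ (show d ≠ 0 by omega) hje)
      omega
    · refine hnd'.imp_of_mem ?_
      intro d₁ d₂ h₁ h₂ hne
      have hm₁ := (hmem d₁).mp h₁
      have hm₂ := (hmem d₂).mp h₂
      intro y hy₁ hy₂
      simp only [List.mem_map] at hy₁ hy₂
      obtain ⟨j₁, hj₁, rfl⟩ := hy₁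
      obtain ⟨j₂, hj₂, he'⟩ := hy₂
      exact hne (rep_unique m p h2 hnd d₁ d₂ j₁.toNat j₂.toNat hm₁.2 hm₂.2 he'.symm).1
  · intro y
    simp only [List.mem_flatMap, List.mem_map]
    constructor
    · rintro ⟨d, hdl, j, hj, rfl⟩
      have hd := (hmem d).mp hdl
      rw [PySem.List.mem_pyRange_one] at hj
      have hp1 : (1:Int) ≤ p ^ j.toNat := one_le_pow₀ (by omega)
      refine ⟨by nlinarith [hd.1], ?_⟩
      exact mul_dvd_mul hd.2 (pow_dvd_pow p (by omega))
    · rintro ⟨hy1, hydvd⟩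
      obtain ⟨d, j, ha, hb, hc, rfl⟩ := pow_divisor_decomp m p hp h2 hnd e.toNat y hy1 hydvd
      refine ⟨d, (hmem d).mpr ⟨ha, hb⟩, (j : Int), ?_, by simp⟩
      rw [PySem.List.mem_pyRange_one]
      omega

-- ---------- extract: n = m * p^e with p ∤ m ----------
theorem extract_spec : ∀ (N : ℕ) (n : Int) (k : ℕ), n.toNat = N → 1 ≤ n →
    0 ≤ (extract n k).1 ∧ 1 ≤ (extract n k).2 ∧
      n = (extract n k).2 * ((k : Int) + 2) ^ (extract n k).1.toNat ∧
      ¬ ((k : Int) + 2) ∣ (extract n k).2 := by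
  intro N
  induction N using Nat.strong_induction_on with
  | _ N ih =>
    intro n k hN hn
    rw [extract]
    split
    · rename_i h
      dsimp only
      have hq := pvFloordivLt n ((k : Int) + 2) (by omega) (by omega)
      have hdvd : ((k : Int) + 2) ∣ n := (PySem.Int.mod_eq_zero_iff_dvd n _).mp h.2
      have hfd : PySem.Int.floordiv n ((k : Int) + 2) * ((k : Int) + 2) = n := by
        have := PySem.Int.floordiv_mul_add_mod n ((k : Int) + 2)
        rw [h.2] at this
        omega
      have hq1 : 1 ≤ PySem.Int.floordiv n ((k : Int) + 2) := by
        rcases hq with ⟨hq0, -⟩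
        by_contra hq1
        have : PySem.Int.floordiv n ((k : Int) + 2) = 0 := by omega
        rw [this] at hfd
        omega
      obtain ⟨ha, hb, hc, hd⟩ := ih _ (by omega) (PySem.Int.floordiv n ((k : Int) + 2)) k rfl hq1
      refine ⟨by omega, hb, ?_, hd⟩
      have htn : ((extract (PySem.Int.floordiv n ((k : Int) + 2)) k).1 + 1).toNat
          = (extract (PySem.Int.floordiv n ((k : Int) + 2)) k).1.toNat + 1 := by omega
      rw [htn, pow_succ, ← mul_assoc, ← hc, hfd]
    · rename_i h
      refine ⟨le_refl 0, hn, by simp, ?_⟩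
      rcases not_and_or.mp h with h' | h'
      · have hn1 : n = 1 := by omega
        rw [hn1]
        intro hdvd
        have := Int.le_of_dvd one_pos hdvd
        omega
      · intro hdvd
        exact h' ((PySem.Int.mod_eq_zero_iff_dvd n _).mpr hdvd)

-- ---------- primality from minimality ----------
theorem int_prime_of_natPrime {q : ℕ} (h : q.Prime) : Prime (q : Int) :=
  Int.prime_iff_natAbs_prime.mpr (by simpa using h)

theorem int_prime_two_le {q : Int} (hq : Prime q) (hpos : 0 < q) : 2 ≤ q := by
  have h := Int.prime_iff_natAbs_prime.mp hq
  have := h.two_le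
  omega

theorem prime_of_min (k : ℕ) (n : Int) (hn : 0 < n) (hdvd : ((k : Int) + 2) ∣ n)
    (hmin : ∀ q : Int, Prime q → 0 < q → q ∣ n → (k : Int) + 2 ≤ q) :
    Prime ((k : Int) + 2) := by
  have hq : (k + 2).minFac.Prime := Nat.minFac_prime (by omega)
  have hqd : ((k + 2).minFac : Int) ∣ ((k : Int) + 2) := by
    have := Nat.minFac_dvd (k + 2)
    exact_mod_cast Int.natCast_dvd_natCast.mpr this
  have hqp : Prime ((k + 2).minFac : Int) := int_prime_of_natPrime hq
  have hpos : (0 : Int) < ((k + 2).minFac : Int) := by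
    have := hq.two_le
    omega
  have h1 := hmin _ hqp hpos (hqd.trans hdvd)
  have h2 : ((k + 2).minFac : Int) ≤ (k : Int) + 2 := Int.le_of_dvd (by omega) hqd
  have : ((k + 2).minFac : Int) = (k : Int) + 2 := le_antisymm h2 h1
  rw [← this]
  exact hqp

theorem prime_of_no_small (n p : Int) (hn : 2 ≤ n) (hp2 : 2 ≤ p)
    (hmin : ∀ q : Int, Prime q → 0 < q → q ∣ n → p ≤ q) (hbig : n < p * p) : Prime n := by
  have hN : ((n.toNat : Int)) = n := Int.toNat_of_nonneg (by omega)
  have hN2 : 2 ≤ n.toNat := by omega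
  set q := n.toNat.minFac with hq_def
  have hq : q.Prime := Nat.minFac_prime (by omega)
  have hqd : q ∣ n.toNat := Nat.minFac_dvd _
  have hqdZ : (q : Int) ∣ n := by
    rw [← hN]
    exact_mod_cast Int.natCast_dvd_natCast.mpr hqd
  have hq1 := hmin _ (int_prime_of_natPrime hq) (by have := hq.two_le; omega) hqdZ
  obtain ⟨M, hM⟩ := hqd
  by_cases hM1 : M = 1
  · rw [hM1, mul_one] at hM
    have : n = (q : Int) := by omega
    rw [this]
    exact int_prime_of_natPrime hq
  · exfalso
    have hMpos : 1 ≤ M := by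
      rcases Nat.eq_zero_or_pos M with h0 | h0
      · rw [h0] at hM; omega
      · omega
    have hM2 : 2 ≤ M := by omega
    have hq2 : M.minFac.Prime := Nat.minFac_prime (by omega)
    have hq2d : M.minFac ∣ n.toNat := (Nat.minFac_dvd M).trans ⟨q, by rw [hM]; ring⟩
    have hq2dZ : (M.minFac : Int) ∣ n := by
      rw [← hN]
      exact_mod_cast Int.natCast_dvd_natCast.mpr hq2d
    have hq2min := hmin _ (int_prime_of_natPrime hq2) (by have := hq2.two_le; omega) hq2dZ
    have hMge : (M : Int) ≥ (M.minFac : Int) := by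
      have := Nat.le_of_dvd (by omega) (Nat.minFac_dvd M)
      exact_mod_cast this
    have hnprod : n = (q : Int) * (M : Int) := by
      rw [← hN]
      exact_mod_cast congrArg (Nat.cast : ℕ → ℤ) hM
    nlinarith

theorem prime_eq_of_dvd {q p : Int} (hq : Prime q) (hp : Prime p) (hqpos : 0 < q)
    (hppos : 0 < p) (hdvd : q ∣ p) : q = p := by
  have hqn := Int.prime_iff_natAbs_prime.mp hq
  have hpn := Int.prime_iff_natAbs_prime.mp hp
  have hdn : q.natAbs ∣ p.natAbs := Int.natAbs_dvd_natAbs.mpr hdvd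
  rcases (Nat.Prime.eq_one_or_self_of_dvd hpn _ hdn) with h | h
  · exact absurd h hqn.ne_one
  · omega

-- ---------- the factorisation loop invariant ----------
theorem loopFac_inv : ∀ (N : ℕ) (n : Int) (k : ℕ) (divs : List Int) (m : Int),
    (n - ((k : Int) + 2)).toNat = N → 1 ≤ n → 1 ≤ m → Divs m divs →
    (∀ q : Int, Prime q → 0 < q → q ∣ n → (k : Int) + 2 ≤ q) →
    (∀ q : Int, Prime q → 0 < q → q ∣ m → q < (k : Int) + 2) →
    ∃ (k' : ℕ) (m' : Int), 1 ≤ m' ∧ 1 ≤ (loopFac n k divs).1 ∧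
      m' * (loopFac n k divs).1 = m * n ∧ Divs m' (loopFac n k divs).2 ∧
      (∀ q : Int, Prime q → 0 < q → q ∣ (loopFac n k divs).1 → (k' : Int) + 2 ≤ q) ∧
      (∀ q : Int, Prime q → 0 < q → q ∣ m' → q < (k' : Int) + 2) ∧
      (loopFac n k divs).1 < ((k' : Int) + 2) * ((k' : Int) + 2) := by
  intro N
  induction N using Nat.strong_induction_on with
  | _ N ih =>
    intro n k divs m hN hn hm hdivs hbig hsmall
    rw [loopFac]
    split
    · rename_i hguard
      have hk5 : (k : Int) + 4 ≤ n := by nlinarith [Int.natCast_nonneg k]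
      split
      · rename_i hmod
        dsimp only
        have hpdvd : ((k : Int) + 2) ∣ n := (PySem.Int.mod_eq_zero_iff_dvd n _).mp hmod
        have hpprime : Prime ((k : Int) + 2) := prime_of_min k n (by omega) hpdvd hbig
        obtain ⟨he0, hr1, hfact, hndvd⟩ := extract_spec n.toNat n k rfl hn
        set r := extract n k with hr_def
        set p : Int := (k : Int) + 2 with hp_def
        have hE1 : 1 ≤ r.1.toNat := by
          by_contra hE
          have : r.1.toNat = 0 := by omega
          rw [this, pow_zero, mul_one] at hfact
          exact hndvd (hfact ▸ hpdvd)
        have hrlt : r.2 < n := by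
          have hpow : p ≤ p ^ r.1.toNat := le_self_pow₀ (by omega) (by omega)
          nlinarith
        have hpm : ¬ p ∣ m := fun hdv => by
          have := hsmall p hpprime (by omega) hdv
          omega
        have hexp := divs_expand m p r.1 divs hpprime (by omega) hm hpm he0 hdivs
        have hbig' : ∀ q : Int, Prime q → 0 < q → q ∣ r.2 → ((k + 1 : ℕ) : Int) + 2 ≤ q := by
          intro q hq hqpos hqd
          have hqn : q ∣ n := hqd.mul_right _ |>.trans (dvd_of_eq hfact.symm)
          have h1 := hbig q hq hqpos hqn
          have hne : q ≠ p := fun hqe => hndvd (hqe ▸ hqd)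
          push_cast
          omega
        have hsmall' : ∀ q : Int, Prime q → 0 < q → q ∣ m * p ^ r.1.toNat →
            q < ((k + 1 : ℕ) : Int) + 2 := by
          intro q hq hqpos hqd
          rcases (hq.2.2 m (p ^ r.1.toNat) hqd) with h | h
          · have := hsmall q hq hqpos h
            push_cast
            omega
          · have hqp : q ∣ p := hq.dvd_of_dvd_pow h
            have := prime_eq_of_dvd hq hpprime hqpos (by omega) hqp
            push_cast
            omega
        have hmeas : (r.2 - (((k + 1 : ℕ) : Int) + 2)).toNat < N := by
          push_cast
          omega
        have hm' : 1 ≤ m * p ^ r.1.toNat := by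
          have hpp : (0 : Int) < p ^ r.1.toNat := pow_pos (by omega) _
          nlinarith
        obtain ⟨k', m', ha, hb, hc, hd, he', hf, hg⟩ :=
          ih _ hmeas r.2 (k + 1) _ (m * p ^ r.1.toNat)
            rfl hr1 hm' hexp hbig' hsmall'
        refine ⟨k', m', ha, hb, ?_, hd, he', hf, hg⟩
        rw [hc, hfact]
        ring
      · rename_i hmod
        have hbig' : ∀ q : Int, Prime q → 0 < q → q ∣ n → ((k + 1 : ℕ) : Int) + 2 ≤ q := by
          intro q hq hqpos hqd
          have h1 := hbig q hq hqpos hqd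
          have hne : q ≠ (k : Int) + 2 := fun hqe => by
            apply hmod
            rw [PySem.Int.mod_eq_zero_iff_dvd]
            exact hqe ▸ hqd
          push_cast
          omega
        have hsmall' : ∀ q : Int, Prime q → 0 < q → q ∣ m → q < ((k + 1 : ℕ) : Int) + 2 := by
          intro q hq hqpos hqd
          have := hsmall q hq hqpos hqd
          push_cast
          omega
        exact ih _ (by push_cast; omega) n (k + 1) divs m
          rfl hn hm hdivs hbig' hsmall'
    · rename_i hguard
      exact ⟨k, m, hm, hn, by ring, hdivs, hbig, hsmall, by omega⟩

-- ---------- f_alt reshaped: divisor list, then flatMap of contributions ----------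
def fAltDivs (x : Int) : List Int :=
  let r := loopFac x 0 [1]
  if 1 < r.1 then
    r.2.flatMap (fun d => (PySem.List.pyRange 0 2 1).map (fun j => d * r.1 ^ j.toNat))
  else r.2

def contribB (x d : Int) : List Int :=
  if 23 ≤ d then
    if d * d < x then
      if okB d || okB (PySem.Int.floordiv x d) then [d, PySem.Int.floordiv x d] else []
    else if d * d = x then [d] else []
  else []

theorem f_alt_eq_foldl (x : Int) :
    f_alt x = PySem.List.sorted ((fAltDivs x).foldl (fun acc d =>
      if 23 ≤ d then
        if d * d < x then
          if okB d || okB (PySem.Int.floordiv x d) then acc ++ [d, PySem.Int.floordiv x d] else acc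
        else if d * d = x then acc ++ [d] else acc
      else acc) ([] : List Int)) (fun y => y) false := rfl

theorem f_alt_eq (x : Int) :
    f_alt x = PySem.List.sorted ((fAltDivs x).flatMap (contribB x)) (fun y => y) false := by
  rw [f_alt_eq_foldl]
  congr 1
  have hfun : (fun (acc : List Int) (d : Int) =>
      if 23 ≤ d then
        if d * d < x then
          if okB d || okB (PySem.Int.floordiv x d) then acc ++ [d, PySem.Int.floordiv x d] else acc
        else if d * d = x then acc ++ [d] else acc
      else acc) = fun acc d => acc ++ contribB x d := by
    funext acc d
    unfold contribB
    split_ifs <;> simp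
  rw [hfun, PySem.List.foldl_append_eq_flatMap]
  simp

theorem divs_fAltDivs (x : Int) (hx : 1 ≤ x) : Divs x (fAltDivs x) := by
  have hbig0 : ∀ q : Int, Prime q → 0 < q → q ∣ x → ((0 : ℕ) : Int) + 2 ≤ q := by
    intro q hq hqpos _
    have := int_prime_two_le hq hqpos
    push_cast
    omega
  have hsmall0 : ∀ q : Int, Prime q → 0 < q → q ∣ (1 : Int) → q < ((0 : ℕ) : Int) + 2 := by
    intro q hq hqpos hqd
    have h1 := Int.le_of_dvd one_pos hqd
    have := int_prime_two_le hq hqpos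
    omega
  obtain ⟨k', m', hm', hnf, hprod, hdivs, hmin, hsm, hlt⟩ :=
    loopFac_inv (x - (((0 : ℕ) : Int) + 2)).toNat x 0 [1] 1 rfl hx (le_refl 1) divs_one hbig0 hsmall0
  unfold fAltDivs
  by_cases h1 : 1 < (loopFac x 0 [1]).1
  · rw [if_pos h1]
    set r := loopFac x 0 [1] with hr_def
    have hk2 : (2 : Int) ≤ (k' : Int) + 2 := by omega
    have hprime : Prime r.1 := prime_of_no_small r.1 ((k' : Int) + 2) (by omega) hk2 hmin hlt
    have hnd : ¬ r.1 ∣ m' := fun hdv => by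
      have := hsm r.1 hprime (by omega) hdv
      have := hmin r.1 hprime (by omega) (dvd_refl _)
      omega
    have hexp := divs_expand m' r.1 1 r.2 hprime (int_prime_two_le hprime (by omega)) hm' hnd
      (by omega) hdivs
    have h2 : ((1 : Int) + 1) = 2 := by norm_num
    rw [h2] at hexp
    have h3 : ((1 : Int)).toNat = 1 := rfl
    rw [h3, pow_one] at hexp
    have hx' : m' * r.1 = x := by rw [hprod]; ring
    rw [hx'] at hexp
    exact hexp
  · rw [if_neg h1]
    have : (loopFac x 0 [1]).1 = 1 := by omega
    rw [this, mul_one] at hprod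
    rw [hprod] at hdivs
    simpa using hdivs

-- ---------- the contributions agree on divisors ----------
theorem contribB_eq_contrib (x d : Int) (h1 : 1 ≤ d) (hd : d ∣ x) :
    contribB x d = contrib x d := by
  have hm : PySem.Int.mod x d = 0 := (PySem.Int.mod_eq_zero_iff_dvd x d).mpr hd
  unfold contribB contrib
  by_cases hA : 23 ≤ d <;> by_cases hB : d * d < x <;>
    by_cases hC : (okB d || okB (PySem.Int.floordiv x d)) = true <;>
      by_cases hD : d * d = x <;>
        simp [hA, hB, hC, hD, hm]

-- ---------- restricting a flatMap to its support ----------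
theorem flatMap_filter_support {α β : Type} (p : α → Bool) (g : α → List β) :
    ∀ (l : List α), (∀ a ∈ l, p a = false → g a = []) →
      l.flatMap g = (l.filter p).flatMap g := by
  intro l
  induction l with
  | nil => intro _; rfl
  | cons a t ihl =>
    intro h
    cases hpa : p a with
    | true =>
      rw [List.flatMap_cons, List.filter_cons_of_pos hpa, List.flatMap_cons,
        ihl (fun b hb => h b (List.mem_cons_of_mem a hb))]
    | false =>
      rw [List.flatMap_cons, List.filter_cons_of_neg (by simp [hpa]),
        h a List.mem_cons_self hpa, List.nil_append,
        ihl (fun b hb => h b (List.mem_cons_of_mem a hb))]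

def goodB (x d : Int) : Bool :=
  decide (23 ≤ d ∧ PySem.Int.mod x d = 0 ∧ d * d ≤ x)

theorem contrib_nil_of_not_good (x d : Int) (h : goodB x d = false) : contrib x d = [] := by
  unfold goodB at h
  rw [decide_eq_false_iff_not] at h
  unfold contrib
  have h1 : ¬ (23 ≤ d ∧ d * d < x ∧ PySem.Int.mod x d = 0 ∧
      (okB d || okB (PySem.Int.floordiv x d)) = true) := by
    rintro ⟨hA, hB, hC, -⟩
    exact h ⟨hA, hC, by omega⟩
  have h2 : ¬ (23 ≤ d ∧ d * d = x) := by
    rintro ⟨hA, hB⟩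
    refine h ⟨hA, ?_, by omega⟩
    rw [PySem.Int.mod_eq_zero_iff_dvd]
    exact ⟨d, hB.symm⟩
  rw [if_neg h1, if_neg h2]

-- ---------- the main positive-input theorem ----------
theorem main_pos (x : Int) (hx : 1 ≤ x) : f x = f_alt x := by
  obtain ⟨hnodupD, hmemD⟩ := divs_fAltDivs x hx
  rw [f_alt_eq]
  unfold f
  rw [A_char x (x - 23).toNat 23 rfl (by omega)]
  have hcB : (fAltDivs x).flatMap (contribB x) = (fAltDivs x).flatMap (contrib x) :=
    List.flatMap_congr (fun d hd => contribB_eq_contrib x d ((hmemD d).mp hd).1 ((hmemD d).mp hd).2)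
  rw [hcB]
  apply PySem.List.sorted_eq_sorted_of_perm _ _ _ (fun a b h => h)
  rw [flatMap_filter_support (goodB x) (contrib x) (PySem.List.pyRange 23 x 1)
      (fun a _ => contrib_nil_of_not_good x a),
    flatMap_filter_support (goodB x) (contrib x) (fAltDivs x)
      (fun a _ => contrib_nil_of_not_good x a)]
  apply List.Perm.flatMap_right
  apply (List.perm_ext_iff_of_nodup ((PySem.List.nodup_pyRange_one 23 x).filter _)
    (hnodupD.filter _)).mpr
  intro d
  simp only [List.mem_filter, PySem.List.mem_pyRange_one, hmemD d]
  unfold goodB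
  simp only [decide_eq_true_eq]
  constructor
  · rintro ⟨⟨h23, hdx⟩, hg⟩
    have hdvd : d ∣ x := (PySem.Int.mod_eq_zero_iff_dvd x d).mp hg.2.1
    exact ⟨⟨by omega, hdvd⟩, hg⟩
  · rintro ⟨⟨h1, hdvd⟩, hg⟩
    have hdx : d < x := by nlinarith [hg.1, hg.2.2]
    exact ⟨⟨hg.1, hdx⟩, hg⟩

-- ---------- nonpositive inputs: both sides are empty ----------
theorem main_nonpos (x : Int) (hx : x ≤ 0) : f x = f_alt x := by
  have hA : f x = [] := by
    unfold f
    rw [loopA, dif_neg (by omega : ¬ (23 : Int) * 23 < x), if_neg (by omega : ¬ (23 : Int) * 23 = x)]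
    simp [PySem.List.sorted_eq_nil_iff]
  have hB : f_alt x = [] := by
    unfold f_alt
    rw [loopFac, dif_neg (by push_cast; omega : ¬ (((0 : ℕ) : Int) + 2) * (((0 : ℕ) : Int) + 2) ≤ x)]
    simp only [if_neg (by omega : ¬ (1 : Int) < x)]
    simp [PySem.List.sorted_eq_nil_iff]
  rw [hA, hB]

-- ===== VERDICT (by name: the statement is the Claim_ definition above) =====
theorem f_spec : Claim_equal_f := by
  intro x _
  unfold Spec_f
  by_cases h : 1 ≤ x
  · exact main_pos x h
  · exact main_nonpos x (by omega)
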